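-- pv_equiv track=rewrite | github.com/IST-DASLab/gptq-gguf-toolkit | mapper/config_converter.py | detect_moe_model
-- ===== SOURCE A (Python) =====
-- def detect_moe_model(hf_config: str) -> bool:
--     """
--     Detect if the model is MoE based on layer names in config.
--
--     Args:
--         hf_config: String containing HuggingFace config
--
--     Returns:
--         True if MoE model detected, False otherwise
--     """
--     moe_indicators = [
--         'experts',
--         'mlp.gate.',
--         'router',
--         'shared_expert'
--     ]
--
--     for line in hf_config.strip().split('\n'):
--         line = line.strip().lower()
--         if any(indicator in line for indicator in moe_indicators):
--             return True
--
--     return False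
-- ===== SOURCE B (Python) =====
-- def detect_moe_model(hf_config: str) -> bool:
--     """
--     Detect if the model is MoE based on layer names in config.
--
--     Simpler re-implementation: no indicator contains whitespace or a newline,
--     so a match inside some stripped, lowercased line is exactly a match in the
--     whole lowercased config.  Lowercase once and do one flat substring scan.
--     """
--     moe_indicators = [
--         'experts',
--         'mlp.gate.',
--         'router',
--         'shared_expert'
--     ]
--     lowered = hf_config.lower()
--     return any(indicator in lowered for indicator in moe_indicators)
-- ===== Notes on version B (the rewrite author's own statement) =====
-- stated objective: simpler
-- what changed: Replaces A's per-line strip/split loop (strip the config, split on newlines, strip+lower each line, scan indicators per line) with lowercasing the whole config once and doing a single flat substring scan, safe because no indicator contains whitespace or a newline.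
import Mathlib
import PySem

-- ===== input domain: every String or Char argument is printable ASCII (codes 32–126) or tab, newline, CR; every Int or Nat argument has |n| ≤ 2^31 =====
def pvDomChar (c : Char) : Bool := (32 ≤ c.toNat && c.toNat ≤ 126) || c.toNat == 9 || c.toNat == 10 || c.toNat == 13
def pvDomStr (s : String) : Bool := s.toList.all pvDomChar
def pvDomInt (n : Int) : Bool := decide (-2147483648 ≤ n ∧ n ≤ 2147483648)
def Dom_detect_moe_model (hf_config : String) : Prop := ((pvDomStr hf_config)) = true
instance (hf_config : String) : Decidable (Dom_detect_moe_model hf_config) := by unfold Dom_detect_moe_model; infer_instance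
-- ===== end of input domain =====

-- B replaces A's per-line strip/lower loop by lowercasing the whole config once and doing one
-- flat substring scan (no indicator contains whitespace or a newline); objective: simpler.

-- ===== PORT A =====
-- the moe_indicators list literal of A
def moeIndicators : List (List Char) :=
  ["experts".toList, "mlp.gate.".toList, "router".toList, "shared_expert".toList]

-- the 'for line in …: … if any(…): return True' loop of A (early return = recursion stopping at true)
def detectMoeLoop : List (List Char) → Bool
  | [] => false
  | line :: rest =>
      let line' := PySem.Chars.lower (PySem.Chars.strip line)
      if moeIndicators.any (fun ind => PySem.Chars.isIn ind line') then true
      else detectMoeLoop rest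

def detect_moe_model (hf_config : String) : Bool :=
  detectMoeLoop (PySem.Chars.splitOn (PySem.Chars.strip hf_config.toList) ['\n'])

-- ===== PORT B =====
def moeIndicatorsB : List (List Char) :=
  ["experts".toList, "mlp.gate.".toList, "router".toList, "shared_expert".toList]

def detect_moe_model_alt (hf_config : String) : Bool :=
  let lowered := PySem.Chars.lower hf_config.toList
  moeIndicatorsB.any (fun indicator => PySem.Chars.isIn indicator lowered)

-- ===== PRECONDITION & SPEC =====
def Spec_detect_moe_model (hf_config : String) (out : Bool) : Prop := out = detect_moe_model_alt hf_config
instance (hf_config : String) (out : Bool) : Decidable (Spec_detect_moe_model hf_config out) := by unfold Spec_detect_moe_model; infer_instance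

-- ===== CLAIM (what is proved, stated in full; the proofs are below) =====
def Claim_equal_detect_moe_model : Prop := ∀ (hf_config : String), Dom_detect_moe_model hf_config → Spec_detect_moe_model hf_config (detect_moe_model hf_config)

-- ===== LEMMAS AND PROOFS =====

-- splitNL c s = (first segment, remaining segments) of splitting s on the single character c
def splitNL (c : Char) : List Char → List Char × List (List Char)
  | [] => ([], [])
  | x :: xs =>
      let p := splitNL c xs
      if x = c then ([], p.1 :: p.2) else (x :: p.1, p.2)

theorem go_spec (c : Char) : ∀ (fuel : Nat) (l cur : List Char) (acc : List (List Char)),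
    l.length ≤ fuel →
    PySem.Chars.splitOn.go [c] fuel l cur acc
      = acc.reverse ++ (cur.reverse ++ (splitNL c l).1) :: (splitNL c l).2 := by
  intro fuel
  induction fuel with
  | zero =>
      intro l cur acc h
      have : l = [] := List.eq_nil_of_length_eq_zero (Nat.le_zero.mp h)
      subst this
      simp [PySem.Chars.splitOn.go, splitNL]
  | succ n ih =>
      intro l cur acc h
      cases l with
      | nil => simp [PySem.Chars.splitOn.go, splitNL]
      | cons x rest =>
          simp only [PySem.Chars.splitOn.go]
          by_cases hx : x = c
          · subst hx
            simp only [List.isPrefixOf, beq_self_eq_true, Bool.and_true, if_true]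
            rw [ih _ _ _ (by simpa using Nat.le_of_succ_le_succ h)]
            simp [splitNL]
          · have hpre : [c].isPrefixOf (x :: rest) = false := by
              simp [List.isPrefixOf, beq_eq_false_iff_ne, Ne.symm hx]
            rw [hpre]
            simp only [Bool.false_eq_true, if_false]
            rw [ih _ _ _ (by simpa using Nat.le_of_succ_le_succ h)]
            simp [splitNL, hx]

theorem splitOn_eq (c : Char) (s : List Char) :
    PySem.Chars.splitOn s [c] = (splitNL c s).1 :: (splitNL c s).2 := by
  unfold PySem.Chars.splitOn
  rw [go_spec c _ _ _ _ (by omega)]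
  simp

-- pointwise facts about lowerChar
theorem isspace_lowerChar (c : Char) :
    PySem.Chars.isspace (PySem.Chars.lowerChar c) = PySem.Chars.isspace c := by
  unfold PySem.Chars.lowerChar PySem.Chars.isupper
  by_cases h : 'A' ≤ c ∧ c ≤ 'Z'
  · have h1 : 65 ≤ c.toNat := h.1
    have h2 : c.toNat ≤ 90 := h.2
    simp only [h.1, h.2, decide_true, Bool.and_self, if_true]
    have hv : (Char.ofNat (c.toNat + 32)).toNat = c.toNat + 32 := by
      rw [Char.toNat_ofNat, if_pos]
      exact Or.inl (by omega)
    have hL : PySem.Chars.isspace (Char.ofNat (c.toNat + 32)) = false := by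
      simp only [PySem.Chars.isspace, hv]
      simp only [Bool.or_eq_false_iff, Bool.and_eq_false_iff, decide_eq_false_iff_not]
      omega
    have hR : PySem.Chars.isspace c = false := by
      simp only [PySem.Chars.isspace]
      simp only [Bool.or_eq_false_iff, Bool.and_eq_false_iff, decide_eq_false_iff_not]
      omega
    rw [hL, hR]
  · have : (decide ('A' ≤ c) && decide (c ≤ 'Z')) = false := by
      rcases Decidable.not_and_iff_or_not.mp h with h' | h' <;> simp [h']
    rw [this]
    simp

theorem lowerChar_eq_iff_of_ne_upper (c d : Char) (hd : ¬ ('A' ≤ d ∧ d ≤ 'Z'))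
    (hd' : ¬ ('a' ≤ d ∧ d ≤ 'z')) : PySem.Chars.lowerChar c = d ↔ c = d := by
  unfold PySem.Chars.lowerChar PySem.Chars.isupper
  by_cases h : 'A' ≤ c ∧ c ≤ 'Z'
  · have h1 : 65 ≤ c.toNat := h.1
    have h2 : c.toNat ≤ 90 := h.2
    simp only [h.1, h.2, decide_true, Bool.and_self, if_true]
    have hv : (Char.ofNat (c.toNat + 32)).toNat = c.toNat + 32 := by
      rw [Char.toNat_ofNat, if_pos]
      exact Or.inl (by omega)
    constructor
    · intro he
      exfalso
      apply hd'
      have : d.toNat = c.toNat + 32 := by rw [← he, hv]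
      constructor
      · show 97 ≤ d.toNat
        omega
      · show d.toNat ≤ 122
        omega
    · intro he
      exfalso
      apply hd
      subst he
      exact h
  · have : (decide ('A' ≤ c) && decide (c ≤ 'Z')) = false := by
      rcases Decidable.not_and_iff_or_not.mp h with h' | h' <;> simp [h']
    rw [this]
    simp

theorem lowerChar_eq_newline (c : Char) : PySem.Chars.lowerChar c = '\n' ↔ c = '\n' := by
  apply lowerChar_eq_iff_of_ne_upper
  · rintro ⟨h1, h2⟩
    have : (65 : Nat) ≤ 10 := le_trans h1 h2 |>.trans_eq rfl |> fun _ => le_trans h1 (le_of_eq rfl)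
    exact absurd (show (65 : Nat) ≤ ('\n').toNat from h1) (by decide)
  · rintro ⟨h1, h2⟩
    exact absurd (show (97 : Nat) ≤ ('\n').toNat from h1) (by decide)

-- a p whose characters all satisfy q is a prefix of l iff it is a prefix of l.takeWhile q
theorem prefix_takeWhile_iff (q : Char → Bool) :
    ∀ (p l : List Char), (∀ c ∈ p, q c = true) → (p <+: l.takeWhile q ↔ p <+: l) := by
  intro p
  induction p with
  | nil => intro l _; simp
  | cons a p' ih =>
      intro l hq
      cases l with
      | nil => simp [List.takeWhile]
      | cons b l' =>
          by_cases hb : q b = true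
          · rw [List.takeWhile_cons_of_pos hb]
            rw [List.cons_prefix_cons, List.cons_prefix_cons,
              ih l' (fun c hc => hq c (List.mem_cons_of_mem _ hc))]
          · rw [List.takeWhile_cons_of_neg (by simp [hb])]
            constructor
            · intro h; exact absurd (List.eq_nil_of_prefix_nil h) (by simp)
            · intro h
              rw [List.cons_prefix_cons] at h
              exact absurd (h.1 ▸ hq a (List.mem_cons_self)) (by simp [hb])

-- a nonempty t none of whose characters satisfies q is an infix of l.dropWhile q iff of l
theorem infix_dropWhile_iff (q : Char → Bool) (t : List Char) (ht : t ≠ [])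
    (hq : ∀ c ∈ t, q c = false) : ∀ (l : List Char), (t <:+: l.dropWhile q ↔ t <:+: l) := by
  intro l
  induction l with
  | nil => simp
  | cons b l' ih =>
      by_cases hb : q b = true
      · rw [List.dropWhile_cons_of_pos hb, ih, List.infix_cons_iff]
        constructor
        · exact Or.inr
        · rintro (h | h)
          · exfalso
            cases t with
            | nil => exact ht rfl
            | cons a t' =>
                rw [List.cons_prefix_cons] at h
                exact absurd (h.1 ▸ hq a (List.mem_cons_self)) (by simp [hb])
          · exact h
      · rw [List.dropWhile_cons_of_neg (by simp [hb])]

-- strip removes only whitespace at the ends: a nonempty whitespace-free t is unaffected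
theorem infix_strip_iff (t : List Char) (ht : t ≠ [])
    (hq : ∀ c ∈ t, PySem.Chars.isspace c = false) (l : List Char) :
    t <:+: PySem.Chars.strip l ↔ t <:+: l := by
  unfold PySem.Chars.strip PySem.Chars.rstrip PySem.Chars.lstrip
  rw [show t <:+: (List.dropWhile PySem.Chars.isspace (List.dropWhile PySem.Chars.isspace l).reverse).reverse
        ↔ t.reverse <:+: List.dropWhile PySem.Chars.isspace (List.dropWhile PySem.Chars.isspace l).reverse from by
      conv_lhs => rw [← List.reverse_reverse t]
      exact List.reverse_infix]
  rw [infix_dropWhile_iff _ _ (by simpa using ht) (fun c hc => hq c (List.mem_reverse.mp hc))]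
  rw [show t.reverse <:+: (List.dropWhile PySem.Chars.isspace l).reverse ↔ t <:+: List.dropWhile PySem.Chars.isspace l from List.reverse_infix]
  exact infix_dropWhile_iff _ _ ht hq l

-- lower commutes with strip
theorem lower_strip (l : List Char) :
    PySem.Chars.lower (PySem.Chars.strip l) = PySem.Chars.strip (PySem.Chars.lower l) := by
  have hfun : (PySem.Chars.isspace ∘ PySem.Chars.lowerChar) = PySem.Chars.isspace :=
    funext fun c => isspace_lowerChar c
  unfold PySem.Chars.strip PySem.Chars.rstrip PySem.Chars.lstrip PySem.Chars.lower
  rw [List.dropWhile_map, hfun, ← List.map_reverse, List.dropWhile_map, hfun, List.map_reverse]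

-- lower commutes with splitting on newline
theorem splitNL_lower (l : List Char) :
    splitNL '\n' (PySem.Chars.lower l)
      = (PySem.Chars.lower (splitNL '\n' l).1, ((splitNL '\n' l).2).map PySem.Chars.lower) := by
  induction l with
  | nil => simp [splitNL, PySem.Chars.lower]
  | cons x xs ih =>
      show splitNL '\n' (PySem.Chars.lowerChar x :: PySem.Chars.lower xs) = _
      rw [splitNL, splitNL, ih]
      by_cases hx : x = '\n'
      · rw [if_pos ((lowerChar_eq_newline x).mpr hx), if_pos hx]
        simp [PySem.Chars.lower]
      · rw [if_neg (fun he => hx ((lowerChar_eq_newline x).mp he)), if_neg hx]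
        simp [PySem.Chars.lower]

-- first segment of splitNL is takeWhile (≠ '\n')
theorem splitNL_fst (l : List Char) :
    (splitNL '\n' l).1 = l.takeWhile (fun c => !(c == '\n')) := by
  induction l with
  | nil => simp [splitNL]
  | cons x xs ih =>
      rw [splitNL]
      by_cases hx : x = '\n'
      · rw [if_pos hx, List.takeWhile_cons_of_neg (by simp [hx])]
      · rw [if_neg hx, List.takeWhile_cons_of_pos (by simp [hx])]
        simp [ih]

-- KEY LEMMA: for newline-free nonempty t, t occurs in l iff it occurs in one of l's newline segments
theorem infix_iff_exists_segment (t : List Char) (ht : t ≠ []) (hnl : '\n' ∉ t) :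
    ∀ (l : List Char),
      (t <:+: l ↔ t <:+: (splitNL '\n' l).1 ∨ ∃ seg ∈ (splitNL '\n' l).2, t <:+: seg) := by
  intro l
  induction l with
  | nil => simp [splitNL, List.infix_nil, ht]
  | cons x xs ih =>
      rw [List.infix_cons_iff, splitNL]
      by_cases hx : x = '\n'
      · rw [if_pos hx]
        simp only [List.infix_nil, List.mem_cons, exists_eq_or_imp]
        constructor
        · rintro (h | h)
          · exfalso
            cases t with
            | nil => exact ht rfl
            | cons a t' =>
                rw [List.cons_prefix_cons] at h
                exact hnl (h.1 ▸ hx ▸ List.mem_cons_self)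
          · right; exact (ih.mp h)
        · rintro (h | h)
          · exact absurd h ht
          · exact Or.inr (ih.mpr h)
      · rw [if_neg hx]
        simp only [List.infix_cons_iff]
        constructor
        · rintro (h | h)
          · left; left
            cases t with
            | nil => exact absurd rfl ht
            | cons a t' =>
                rw [List.cons_prefix_cons] at h ⊢
                refine ⟨h.1, ?_⟩
                rw [splitNL_fst, prefix_takeWhile_iff _ t' xs ?_]
                · exact h.2
                · intro c hc
                  simp only [Bool.not_eq_eq_eq_not, Bool.not_true, beq_eq_false_iff_ne]
                  intro he
                  exact hnl (he ▸ List.mem_cons_of_mem _ hc)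
          · rcases ih.mp h with h' | h'
            · left; right; exact h'
            · right; exact h'
        · rintro ((h | h) | h)
          · left
            cases t with
            | nil => exact absurd rfl ht
            | cons a t' =>
                rw [List.cons_prefix_cons] at h ⊢
                refine ⟨h.1, ?_⟩
                rw [splitNL_fst, prefix_takeWhile_iff _ t' xs ?_] at h
                · exact h.2
                · intro c hc
                  simp only [Bool.not_eq_eq_eq_not, Bool.not_true, beq_eq_false_iff_ne]
                  intro he
                  exact hnl (he ▸ List.mem_cons_of_mem _ hc)
          · right; exact ih.mpr (Or.inl h)
          · right; exact ih.mpr (Or.inr h)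

-- A's loop is an 'any' over the lines
theorem detectMoeLoop_eq_any (lines : List (List Char)) :
    detectMoeLoop lines
      = lines.any (fun line =>
          moeIndicators.any (fun ind =>
            PySem.Chars.isIn ind (PySem.Chars.lower (PySem.Chars.strip line)))) := by
  induction lines with
  | nil => rfl
  | cons line rest ih =>
      rw [detectMoeLoop, List.any_cons]
      by_cases h : moeIndicators.any (fun ind =>
          PySem.Chars.isIn ind (PySem.Chars.lower (PySem.Chars.strip line))) = true
      · simp [h]
      · simp only [Bool.not_eq_true] at h
        simp [h, ih]

-- an indicator is 'good': nonempty, whitespace-free (hence newline-free)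
theorem indicator_good (t : List Char) (hmem : t ∈ moeIndicators) :
    t ≠ [] ∧ (∀ c ∈ t, PySem.Chars.isspace c = false) ∧ '\n' ∉ t := by
  simp only [moeIndicators, List.mem_cons, List.not_mem_nil, or_false] at hmem
  rcases hmem with rfl | rfl | rfl | rfl <;>
    exact ⟨by decide, by simp [PySem.Chars.isspace], by decide⟩

-- for a good t: t occurs in some stripped lowered line of strip l  iff  t occurs in lower l
theorem good_indicator_iff (t : List Char) (ht : t ≠ [])
    (hsp : ∀ c ∈ t, PySem.Chars.isspace c = false) (hnl : '\n' ∉ t) (l : List Char) :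
    ((PySem.Chars.splitOn (PySem.Chars.strip l) ['\n']).any
        (fun line => PySem.Chars.isIn t (PySem.Chars.lower (PySem.Chars.strip line))))
      = PySem.Chars.isIn t (PySem.Chars.lower l) := by
  rw [Bool.eq_iff_iff]
  simp only [List.any_eq_true, PySem.Chars.isIn_iff_infix]
  have step : ∀ line : List Char,
      (t <:+: PySem.Chars.lower (PySem.Chars.strip line)) ↔ t <:+: PySem.Chars.lower line := by
    intro line
    rw [lower_strip, infix_strip_iff t ht hsp]
  constructor
  · rintro ⟨line, hline, hocc⟩
    rw [step line] at hocc
    -- the lines of strip l are the splitNL segments of strip l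
    rw [splitOn_eq] at hline
    -- so lower line is a segment of lower (strip l); conclude t <:+: lower (strip l)
    have : t <:+: PySem.Chars.lower (PySem.Chars.strip l) := by
      rw [infix_iff_exists_segment t ht hnl, splitNL_lower]
      rcases List.mem_cons.mp hline with h | h
      · left; rw [h] at hocc; exact hocc
      · right; exact ⟨PySem.Chars.lower line, List.mem_map_of_mem h, hocc⟩
    rw [lower_strip, infix_strip_iff t ht hsp] at this
    exact this
  · intro hocc
    have h1 : t <:+: PySem.Chars.lower (PySem.Chars.strip l) := by
      rw [lower_strip, infix_strip_iff t ht hsp]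
      exact hocc
    rw [infix_iff_exists_segment t ht hnl, splitNL_lower] at h1
    rw [splitOn_eq]
    rcases h1 with h | ⟨seg, hseg, hocc'⟩
    · exact ⟨(splitNL '\n' (PySem.Chars.strip l)).1, List.mem_cons_self,
        (step _).mpr h⟩
    · rcases List.mem_map.mp hseg with ⟨line, hline, rfl⟩
      exact ⟨line, List.mem_cons_of_mem _ hline, (step _).mpr hocc'⟩

-- ===== VERDICT (by name: the statement is the Claim_ definition above) =====
theorem detect_moe_model_spec : Claim_equal_detect_moe_model := by
  intro hf_config _
  unfold Spec_detect_moe_model detect_moe_model detect_moe_model_alt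
  rw [detectMoeLoop_eq_any]
  show _ = moeIndicatorsB.any (fun indicator =>
      PySem.Chars.isIn indicator (PySem.Chars.lower hf_config.toList))
  rw [show moeIndicatorsB = moeIndicators from rfl, Bool.eq_iff_iff]
  simp only [List.any_eq_true]
  constructor
  · rintro ⟨line, hline, hind⟩
    rcases hind with ⟨t, htmem, hocc⟩
    obtain ⟨ht, hsp, hnl⟩ := indicator_good t htmem
    refine ⟨t, htmem, ?_⟩
    rw [← good_indicator_iff t ht hsp hnl hf_config.toList]
    exact List.any_eq_true.mpr ⟨line, hline, hocc⟩
  · rintro ⟨t, htmem, hocc⟩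
    obtain ⟨ht, hsp, hnl⟩ := indicator_good t htmem
    rw [← good_indicator_iff t ht hsp hnl hf_config.toList] at hocc
    rcases List.any_eq_true.mp hocc with ⟨line, hline, hocc'⟩
    exact ⟨line, hline, t, htmem, hocc'⟩
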